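-- pv_equiv track=rewrite | github.com/SudM/diff | Environment_Toggle_Drift/PolicyList.py | pick_single_condition_path
-- ===== SOURCE A (Python) =====
-- def pick_single_condition_path(cond_names):
--     targeting = [c for c in cond_names if c.startswith("POLICY.TARGETING")]
--     toggles = [c for c in cond_names if c.startswith("POLICY.TOGGLES")]
--
--     def longest(cands):
--         return max(cands, key=lambda s: len(s.split("."))) if cands else ""
--
--     if targeting:
--         action_first = [c for c in targeting if ".ACTION." in c]
--         return longest(action_first) if action_first else longest(targeting)
--     if toggles:
--         return longest(toggles)
--     return ""
-- ===== SOURCE B (Python) =====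
-- def pick_single_condition_path(cond_names):
--     # one ranked pass: priority tier encoded ahead of dot-count in a single key
--     best = None
--     best_key = None
--     for c in cond_names:
--         if c.startswith("POLICY.TARGETING"):
--             k = (2, 1 if ".ACTION." in c else 0, len(c.split(".")))
--         elif c.startswith("POLICY.TOGGLES"):
--             k = (1, 0, len(c.split(".")))
--         else:
--             continue
--         if best is None or best_key < k:
--             best, best_key = c, k
--     return best if best is not None else ""
-- ===== Notes on version B (the rewrite author's own statement) =====
-- stated objective: alternative
-- what changed: Replaced A's cascade of list filters with re-scans and per-branch max calls by a single pass that assigns each eligible name one lexicographic ranking key (priority tier, ACTION flag, dot-count) and keeps the first maximum.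
import Mathlib
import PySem

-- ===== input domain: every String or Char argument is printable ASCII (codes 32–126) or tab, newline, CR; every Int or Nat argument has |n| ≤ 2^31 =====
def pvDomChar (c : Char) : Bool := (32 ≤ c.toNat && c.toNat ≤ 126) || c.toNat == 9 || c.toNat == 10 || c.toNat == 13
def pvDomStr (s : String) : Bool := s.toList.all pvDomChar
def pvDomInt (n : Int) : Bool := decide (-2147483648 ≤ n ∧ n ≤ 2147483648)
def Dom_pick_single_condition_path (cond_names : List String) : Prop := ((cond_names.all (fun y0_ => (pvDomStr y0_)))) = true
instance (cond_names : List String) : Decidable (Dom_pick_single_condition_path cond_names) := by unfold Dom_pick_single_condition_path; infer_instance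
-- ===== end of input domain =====

-- B replaces A's cascade of filters with one ranked pass (priority tier encoded ahead of
-- dot-count in a single lexicographic key); alternative decomposition, same behaviour.


-- ===== PORT A =====
-- helper 'longest(cands)': max(cands, key=lambda s: len(s.split("."))) if cands else ""
def pvA_longest (cands : List String) : String :=
  if cands ≠ [] then
    (PySem.List.max? cands (fun s => ((PySem.Str.split? s ".").getD []).length)).getD ""
  else ""

def pick_single_condition_path (cond_names : List String) : String :=
  let targeting := cond_names.filter (fun c => PySem.Str.startswith c "POLICY.TARGETING")
  let toggles := cond_names.filter (fun c => PySem.Str.startswith c "POLICY.TOGGLES")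
  if targeting ≠ [] then
    let action_first := targeting.filter (fun c => PySem.Str.isIn ".ACTION." c)
    if action_first ≠ [] then pvA_longest action_first else pvA_longest targeting
  else if toggles ≠ [] then pvA_longest toggles
  else ""

-- ===== PORT B =====
-- ranking key: none = ineligible (the 'continue' branch)
def pvB_key? (c : String) : Option (Nat × Nat × Nat) :=
  if PySem.Str.startswith c "POLICY.TARGETING" then
    some (2, (if PySem.Str.isIn ".ACTION." c then 1 else 0),
          ((PySem.Str.split? c ".").getD []).length)
  else if PySem.Str.startswith c "POLICY.TOGGLES" then
    some (1, 0, ((PySem.Str.split? c ".").getD []).length)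
  else none

-- Python's tuple '<' on the 3-tuple keys (lexicographic), transliterated
def pvB_lt (k k' : Nat × Nat × Nat) : Bool :=
  k.1 < k'.1 || (k.1 == k'.1 && (k.2.1 < k'.2.1 || (k.2.1 == k'.2.1 && k.2.2 < k'.2.2)))

-- loop body: skip ineligible names, keep first maximum under pvB_lt
def pvB_step (best : Option (String × (Nat × Nat × Nat))) (c : String) :
    Option (String × (Nat × Nat × Nat)) :=
  match pvB_key? c with
  | none => best
  | some k =>
    match best with
    | none => some (c, k)
    | some (b, bk) => if pvB_lt bk k then some (c, k) else some (b, bk)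

def pick_single_condition_path_alt (cond_names : List String) : String :=
  match cond_names.foldl pvB_step none with
  | some (b, _) => b
  | none => ""

-- ===== PRECONDITION & SPEC =====
def Spec_pick_single_condition_path (cond_names : List String) (out : String) : Prop := out = pick_single_condition_path_alt cond_names
instance (cond_names : List String) (out : String) : Decidable (Spec_pick_single_condition_path cond_names out) := by unfold Spec_pick_single_condition_path; infer_instance

-- ===== CLAIM (what is proved, stated in full; the proofs are below) =====
def Claim_equal_pick_single_condition_path : Prop := ∀ (cond_names : List String), Dom_pick_single_condition_path cond_names → Spec_pick_single_condition_path cond_names (pick_single_condition_path cond_names)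

-- ===== LEMMAS AND PROOFS =====

-- number of dot-separated pieces, the shared ranking ingredient
def pvDots (s : String) : Nat := ((PySem.Str.split? s ".").getD []).length

lemma pvB_lt_asymm {k k' : Nat × Nat × Nat} (h : pvB_lt k k' = true) : pvB_lt k' k = false := by
  rcases k with ⟨a, b, c⟩; rcases k' with ⟨a', b', c'⟩
  simp [pvB_lt] at h ⊢; omega

lemma pvB_lt_same_tier (r a x y : Nat) : pvB_lt (r, a, x) (r, a, y) = decide (x < y) := by
  simp [pvB_lt]

-- key shapes ------------------------------------------------------------
lemma key_targ {c : String} (h : PySem.Str.startswith c "POLICY.TARGETING" = true) :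
    pvB_key? c = some (2, (if PySem.Str.isIn ".ACTION." c then 1 else 0), pvDots c) := by
  unfold pvB_key? pvDots
  rw [if_pos h]

lemma key_first_two {c : String} {k : Nat × Nat × Nat} (h : pvB_key? c = some k) :
    (k.1 = 2 ∧ PySem.Str.startswith c "POLICY.TARGETING" = true ∧
      (k.2.1 = if PySem.Str.isIn ".ACTION." c then 1 else 0)) ∨
    (k.1 = 1 ∧ k.2.1 = 0 ∧ PySem.Str.startswith c "POLICY.TARGETING" = false) := by
  unfold pvB_key? at h
  split_ifs at h with h1 h2 h3
  · obtain rfl := Option.some.inj h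
    exact Or.inl ⟨rfl, h1, (if_pos h2).symm⟩
  · obtain rfl := Option.some.inj h
    exact Or.inl ⟨rfl, h1, (if_neg h2).symm⟩
  · obtain rfl := Option.some.inj h
    exact Or.inr ⟨rfl, rfl, Bool.eq_false_iff.mpr h1⟩

-- H1: an eligible TARGETING name strictly outranks any eligible non-TARGETING name
lemma pvH1 {a c : String} {ka kc : Nat × Nat × Nat}
    (hpa : PySem.Str.startswith a "POLICY.TARGETING" = true)
    (hpc : PySem.Str.startswith c "POLICY.TARGETING" = false)
    (hka : pvB_key? a = some ka) (hkc : pvB_key? c = some kc) : pvB_lt kc ka = true := by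
  rcases key_first_two hka with ⟨ha1, _, _⟩ | ⟨_, _, h⟩
  · rcases key_first_two hkc with ⟨_, h, _⟩ | ⟨hc1, hc2, _⟩
    · rw [h] at hpc; cases hpc
    · rcases ka with ⟨x, y, z⟩; rcases kc with ⟨x', y', z'⟩
      simp only at ha1 hc1 hc2
      simp [pvB_lt, ha1, hc1]
  · rw [h] at hpa; cases hpa

-- H2: among TARGETING names, one containing ".ACTION." outranks any eligible name without it
lemma pvH2 {a c : String} {ka kc : Nat × Nat × Nat}
    (hpa : (PySem.Str.startswith a "POLICY.TARGETING" && PySem.Str.isIn ".ACTION." a) = true)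
    (hpc : (PySem.Str.startswith c "POLICY.TARGETING" && PySem.Str.isIn ".ACTION." c) = false)
    (hka : pvB_key? a = some ka) (hkc : pvB_key? c = some kc) : pvB_lt kc ka = true := by
  simp only [Bool.and_eq_true] at hpa
  have hka' := key_targ hpa.1
  rw [hka, Option.some.injEq] at hka'
  rw [hpa.2, if_pos rfl] at hka'
  rcases key_first_two hkc with ⟨hc1, hc2, hc3⟩ | ⟨hc1, hc2, _⟩ <;>
    rcases ka with ⟨x, y, z⟩ <;> rcases kc with ⟨x', y', z'⟩ <;>
    obtain ⟨rfl, rfl, rfl⟩ := Prod.mk.injEq .. ▸ hka' <;> simp only at hc1 hc2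
  · rw [hc2, Bool.true_and] at hpc
    rw [hpc, if_neg (by simp)] at hc3
    simp only at hc3
    simp [pvB_lt, hc1, hc3]
  · simp [pvB_lt, hc1]

-- L_absorb: once the running best satisfies p, the non-p names can be filtered out
lemma pvAbsorb (p : String → Bool)
    (H : ∀ a c ka kc, p a = true → p c = false → pvB_key? a = some ka →
        pvB_key? c = some kc → pvB_lt kc ka = true) :
    ∀ (xs : List String) (b : String) (kb : Nat × Nat × Nat), p b = true →
      pvB_key? b = some kb →
      xs.foldl pvB_step (some (b, kb)) = (xs.filter p).foldl pvB_step (some (b, kb)) := by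
  intro xs
  induction xs with
  | nil => intro b kb _ _; rfl
  | cons x t ih =>
    intro b kb hpb hkb
    by_cases hpx : p x = true
    · simp only [List.filter_cons, hpx, if_true, List.foldl_cons]
      cases hkx : pvB_key? x with
      | none => simp only [pvB_step, hkx]; exact ih b kb hpb hkb
      | some kx =>
        simp only [pvB_step, hkx]
        by_cases hlt : pvB_lt kb kx = true
        · simp only [hlt, if_true]; exact ih x kx hpx hkx
        · simp only [Bool.not_eq_true] at hlt; simp only [hlt]
          simp only [Bool.false_eq_true, if_false]
          exact ih b kb hpb hkb
    · simp only [Bool.not_eq_true] at hpx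
      simp only [List.filter_cons, hpx, List.foldl_cons]
      cases hkx : pvB_key? x with
      | none => simp only [pvB_step, hkx]; exact ih b kb hpb hkb
      | some kx =>
        have := pvB_lt_asymm (H b x kb kx hpb hpx hkb hkx)
        simp only [pvB_step, hkx, this]
        simp only [Bool.false_eq_true, if_false]
        exact ih b kb hpb hkb

-- L_enter: while no p-name is the running best, the fold equals a fresh fold over the p-names,
-- provided some p-name with a key exists
lemma pvEnter (p : String → Bool)
    (H : ∀ a c ka kc, p a = true → p c = false → pvB_key? a = some ka →
        pvB_key? c = some kc → pvB_lt kc ka = true) :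
    ∀ (xs : List String) (acc : Option (String × (Nat × Nat × Nat))),
      (acc = none ∨ ∃ b kb, acc = some (b, kb) ∧ p b = false ∧ pvB_key? b = some kb) →
      xs.filter (fun c => p c && (pvB_key? c).isSome) ≠ [] →
      xs.foldl pvB_step acc = (xs.filter p).foldl pvB_step none := by
  intro xs
  induction xs with
  | nil => intro acc _ hne; simp at hne
  | cons x t ih =>
    intro acc hacc hne
    cases hkx : pvB_key? x with
    | none =>
      have hskip : pvB_step acc x = acc := by
        cases acc <;> simp [pvB_step, hkx]
      have hfe : (x :: t).filter (fun c => p c && (pvB_key? c).isSome)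
          = t.filter (fun c => p c && (pvB_key? c).isSome) := by
        simp [hkx]
      by_cases hpx : p x = true
      · simp only [List.filter_cons, hpx, if_true, List.foldl_cons, hskip]
        have := ih acc hacc (by rw [hfe] at hne; exact hne)
        rw [this]
        simp [pvB_step, hkx]
      · simp only [Bool.not_eq_true] at hpx
        simp only [List.filter_cons, hpx, List.foldl_cons, hskip]
        exact ih acc hacc (by rw [hfe] at hne; exact hne)
    | some kx =>
      by_cases hpx : p x = true
      · -- x enters as the new best on both sides
        have hleft : pvB_step acc x = some (x, kx) := by
          rcases hacc with h | ⟨b, kb, h, hpb, hkb⟩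
          · simp [h, pvB_step, hkx]
          · simp [h, pvB_step, hkx, H x b kx kb hpx hpb hkx hkb]
        simp only [List.filter_cons, hpx, if_true, List.foldl_cons, hleft]
        have hright : pvB_step none x = some (x, kx) := by simp [pvB_step, hkx]
        rw [hright, pvAbsorb p H t x kx hpx hkx]
      · simp only [Bool.not_eq_true] at hpx
        have hfe : (x :: t).filter (fun c => p c && (pvB_key? c).isSome)
            = t.filter (fun c => p c && (pvB_key? c).isSome) := by
          simp [hpx]
        simp only [List.filter_cons, hpx, List.foldl_cons]
        have hacc' : pvB_step acc x = some (x, kx) ∨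
            ∃ b kb, pvB_step acc x = some (b, kb) ∧ p b = false ∧ pvB_key? b = some kb := by
          rcases hacc with h | ⟨b, kb, h, hpb, hkb⟩
          · left; simp [h, pvB_step, hkx]
          · subst h; simp only [pvB_step, hkx]
            by_cases hlt : pvB_lt kb kx = true
            · left; simp [hlt]
            · right; exact ⟨b, kb, by simp [Bool.not_eq_true] at hlt; simp [hlt], hpb, hkb⟩
        have hne' := by rw [hfe] at hne; exact hne
        rcases hacc' with h | ⟨b, kb, h, hpb, hkb⟩
        · rw [h]; exact ih _ (Or.inr ⟨x, kx, rfl, hpx, hkx⟩) hne'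
        · rw [h]; exact ih _ (Or.inr ⟨b, kb, rfl, hpb, hkb⟩) hne'

-- skip lemma: names with no key never change the fold
lemma pvSkip : ∀ (xs : List String) (acc : Option (String × (Nat × Nat × Nat))),
    xs.foldl pvB_step acc = (xs.filter (fun c => (pvB_key? c).isSome)).foldl pvB_step acc := by
  intro xs
  induction xs with
  | nil => intro acc; rfl
  | cons x t ih =>
    intro acc
    cases hkx : pvB_key? x with
    | none =>
      have : pvB_step acc x = acc := by cases acc <;> simp [pvB_step, hkx]
      simp [hkx, this, ih]
    | some kx => simp [hkx, ih]

-- A's max-by-dot-count fold (the body of max?, with A's key inlined)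
def pvF (acc : Option String) (x : String) : Option String :=
  match acc with
  | none => some x
  | some m => if pvDots m < pvDots x then some x else some m

lemma pvmax_eq (xs : List String) :
    PySem.List.max? xs (fun s => ((PySem.Str.split? s ".").getD []).length)
      = xs.foldl pvF none := by
  unfold PySem.List.max?
  congr 1
  funext acc x
  cases acc <;> rfl

lemma pvF_isSome : ∀ (t : List String) (m : String), ∃ y, t.foldl pvF (some m) = some y := by
  intro t
  induction t with
  | nil => exact fun m => ⟨m, rfl⟩
  | cons x s ih =>
    intro m
    simp only [List.foldl_cons, pvF]
    by_cases h : pvDots m < pvDots x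
    · rw [if_pos h]; exact ih x
    · rw [if_neg h]; exact ih m

-- uniform stratum: when every key shares tier (r, a), B's fold is A's first-max-by-dots fold
lemma pvUniform (r a : Nat) :
    ∀ (xs : List String) (b : String),
      (∀ c ∈ xs, pvB_key? c = some (r, a, pvDots c)) →
      xs.foldl pvB_step (some (b, (r, a, pvDots b)))
        = (xs.foldl pvF (some b)).map (fun m => (m, (r, a, pvDots m))) := by
  intro xs
  induction xs with
  | nil => intro b _; rfl
  | cons x t ih =>
    intro b hall
    have hkx := hall x (List.mem_cons_self ..)
    simp only [List.foldl_cons, pvB_step, hkx, pvB_lt_same_tier, pvF]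
    by_cases hlt : pvDots b < pvDots x
    · rw [if_pos hlt]
      simp only [hlt, decide_true, if_true]
      exact ih x (fun c hc => hall c (List.mem_cons_of_mem _ hc))
    · rw [if_neg hlt]
      simp only [hlt, decide_false]
      simp only [Bool.false_eq_true, if_false]
      exact ih b (fun c hc => hall c (List.mem_cons_of_mem _ hc))

-- whole-list form of the uniform stratum: B's answer is pvA_longest
lemma pvUniform_longest (r a : Nat) (xs : List String)
    (hall : ∀ c ∈ xs, pvB_key? c = some (r, a, pvDots c)) (hne : xs ≠ []) :
    (match xs.foldl pvB_step none with
      | some (b, _) => b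
      | none => "") = pvA_longest xs := by
  cases xs with
  | nil => exact absurd rfl hne
  | cons x t =>
    have hkx := hall x (List.mem_cons_self ..)
    have h1 : pvB_step none x = some (x, (r, a, pvDots x)) := by simp [pvB_step, hkx]
    rw [List.foldl_cons, h1, pvUniform r a t x (fun c hc => hall c (List.mem_cons_of_mem _ hc))]
    unfold pvA_longest
    rw [if_pos (by simp), pvmax_eq, List.foldl_cons]
    have h2 : pvF none x = some x := rfl
    rw [h2]
    obtain ⟨y, hy⟩ := pvF_isSome t x
    rw [hy]
    rfl

lemma key_togg {c : String} (h1 : PySem.Str.startswith c "POLICY.TARGETING" = false)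
    (h2 : PySem.Str.startswith c "POLICY.TOGGLES" = true) :
    pvB_key? c = some (1, 0, pvDots c) := by
  unfold pvB_key? pvDots
  rw [if_neg (by rw [h1]; exact Bool.false_ne_true), if_pos h2]

lemma key_none {c : String} (h1 : PySem.Str.startswith c "POLICY.TARGETING" = false)
    (h2 : PySem.Str.startswith c "POLICY.TOGGLES" = false) : pvB_key? c = none := by
  unfold pvB_key?
  rw [if_neg (by rw [h1]; exact Bool.false_ne_true),
    if_neg (by rw [h2]; exact Bool.false_ne_true)]

lemma key_isSome_of_targ {c : String}
    (h : PySem.Str.startswith c "POLICY.TARGETING" = true) : (pvB_key? c).isSome = true := by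
  rw [key_targ h]; rfl

lemma pvMain (cond_names : List String) :
    pick_single_condition_path cond_names = pick_single_condition_path_alt cond_names := by
  unfold pick_single_condition_path pick_single_condition_path_alt
  dsimp only
  split_ifs with hT hAF hG
  · -- targeting ≠ [], action_first ≠ []
    have e1 : cond_names.foldl pvB_step none
        = (cond_names.filter (fun c => PySem.Str.startswith c "POLICY.TARGETING")).foldl
            pvB_step none := by
      have hfc : ∀ c, ((PySem.Str.startswith c "POLICY.TARGETING") && (pvB_key? c).isSome)
          = PySem.Str.startswith c "POLICY.TARGETING" := by
        intro c
        by_cases h : PySem.Str.startswith c "POLICY.TARGETING" = true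
        · simp only [h, key_isSome_of_targ h, Bool.and_true]
        · simp only [Bool.eq_false_iff.mpr h, Bool.false_and]
      have := pvEnter (fun c => PySem.Str.startswith c "POLICY.TARGETING")
        (fun a c ka kc hpa hpc => pvH1 hpa hpc) cond_names none (Or.inl rfl)
        (by simpa only [hfc] using hT)
      exact this
    have e2 : (cond_names.filter (fun c => PySem.Str.startswith c "POLICY.TARGETING")).foldl
          pvB_step none
        = ((cond_names.filter (fun c => PySem.Str.startswith c "POLICY.TARGETING")).filter
            (fun c => PySem.Str.isIn ".ACTION." c)).foldl pvB_step none := by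
      have hfc : ∀ c, ((PySem.Str.startswith c "POLICY.TARGETING"
            && PySem.Str.isIn ".ACTION." c) && (pvB_key? c).isSome)
          = (PySem.Str.startswith c "POLICY.TARGETING" && PySem.Str.isIn ".ACTION." c) := by
        intro c
        by_cases h : PySem.Str.startswith c "POLICY.TARGETING" = true
        · simp only [h, key_isSome_of_targ h, Bool.and_true]
        · simp only [Bool.eq_false_iff.mpr h, Bool.false_and]
      have hfil : (cond_names.filter
            (fun c => PySem.Str.startswith c "POLICY.TARGETING")).filter
            (fun c => PySem.Str.startswith c "POLICY.TARGETING"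
              && PySem.Str.isIn ".ACTION." c)
          = (cond_names.filter (fun c => PySem.Str.startswith c "POLICY.TARGETING")).filter
            (fun c => PySem.Str.isIn ".ACTION." c) := by
        refine List.filter_congr ?_
        intro c hc
        rw [(List.mem_filter.mp hc).2, Bool.true_and]
      have := pvEnter (fun c => PySem.Str.startswith c "POLICY.TARGETING"
            && PySem.Str.isIn ".ACTION." c)
        (fun a c ka kc hpa hpc => pvH2 hpa hpc)
        (cond_names.filter (fun c => PySem.Str.startswith c "POLICY.TARGETING")) none
        (Or.inl rfl)
        (by
          rw [show (fun c => (PySem.Str.startswith c "POLICY.TARGETING"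
              && PySem.Str.isIn ".ACTION." c) && (pvB_key? c).isSome)
            = (fun c => PySem.Str.startswith c "POLICY.TARGETING"
              && PySem.Str.isIn ".ACTION." c) from funext hfc, hfil]
          exact hAF)
      rw [this, hfil]
    have hall : ∀ c ∈ (cond_names.filter
          (fun c => PySem.Str.startswith c "POLICY.TARGETING")).filter
          (fun c => PySem.Str.isIn ".ACTION." c),
        pvB_key? c = some (2, 1, pvDots c) := by
      intro c hc
      obtain ⟨hc1, hc2⟩ := List.mem_filter.mp hc
      rw [key_targ (List.mem_filter.mp hc1).2, hc2, if_pos rfl]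
    rw [e1, e2] at *
    exact (pvUniform_longest 2 1 _ hall hAF).symm
  · -- targeting ≠ [], action_first = []
    have e1 : cond_names.foldl pvB_step none
        = (cond_names.filter (fun c => PySem.Str.startswith c "POLICY.TARGETING")).foldl
            pvB_step none := by
      have hfc : ∀ c, ((PySem.Str.startswith c "POLICY.TARGETING") && (pvB_key? c).isSome)
          = PySem.Str.startswith c "POLICY.TARGETING" := by
        intro c
        by_cases h : PySem.Str.startswith c "POLICY.TARGETING" = true
        · simp only [h, key_isSome_of_targ h, Bool.and_true]
        · simp only [Bool.eq_false_iff.mpr h, Bool.false_and]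
      exact pvEnter (fun c => PySem.Str.startswith c "POLICY.TARGETING")
        (fun a c ka kc hpa hpc => pvH1 hpa hpc) cond_names none (Or.inl rfl)
        (by simpa only [hfc] using hT)
    have hAF' := not_ne_iff.mp hAF
    have hnoact : ∀ c ∈ cond_names.filter
        (fun c => PySem.Str.startswith c "POLICY.TARGETING"),
        PySem.Str.isIn ".ACTION." c = false := by
      intro c hc
      have := List.filter_eq_nil_iff.mp hAF' c hc
      exact Bool.eq_false_iff.mpr this
    have hall : ∀ c ∈ cond_names.filter
        (fun c => PySem.Str.startswith c "POLICY.TARGETING"),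
        pvB_key? c = some (2, 0, pvDots c) := by
      intro c hc
      rw [key_targ (List.mem_filter.mp hc).2, hnoact c hc, if_neg (by simp)]
    rw [e1]
    exact (pvUniform_longest 2 0 _ hall hT).symm
  · -- targeting = [], toggles ≠ []
    have hT' := not_ne_iff.mp hT
    have hnt : ∀ c ∈ cond_names, PySem.Str.startswith c "POLICY.TARGETING" = false :=
      fun c hc => Bool.eq_false_iff.mpr (List.filter_eq_nil_iff.mp hT' c hc)
    have e1 : cond_names.foldl pvB_step none
        = (cond_names.filter (fun c => PySem.Str.startswith c "POLICY.TOGGLES")).foldl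
            pvB_step none := by
      rw [pvSkip cond_names none]
      congr 1
      refine List.filter_congr ?_
      intro c hc
      by_cases h2 : PySem.Str.startswith c "POLICY.TOGGLES" = true
      · rw [key_togg (hnt c hc) h2, h2]; rfl
      · rw [key_none (hnt c hc) (Bool.eq_false_iff.mpr h2), Bool.eq_false_iff.mpr h2]; rfl
    have hall : ∀ c ∈ cond_names.filter
        (fun c => PySem.Str.startswith c "POLICY.TOGGLES"),
        pvB_key? c = some (1, 0, pvDots c) := by
      intro c hc
      obtain ⟨hc1, hc2⟩ := List.mem_filter.mp hc
      exact key_togg (hnt c hc1) hc2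
    rw [e1]
    exact (pvUniform_longest 1 0 _ hall hG).symm
  · -- targeting = [], toggles = []
    have hT' := not_ne_iff.mp hT
    have hG' := not_ne_iff.mp hG
    have hnone : cond_names.filter (fun c => (pvB_key? c).isSome) = [] := by
      refine List.filter_eq_nil_iff.mpr ?_
      intro c hc
      rw [key_none (Bool.eq_false_iff.mpr (List.filter_eq_nil_iff.mp hT' c hc))
        (Bool.eq_false_iff.mpr (List.filter_eq_nil_iff.mp hG' c hc))]
      simp
    rw [pvSkip cond_names none, hnone]
    rfl

-- ===== VERDICT (by name: the statement is the Claim_ definition above) =====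
theorem pick_single_condition_path_spec : Claim_equal_pick_single_condition_path := by
  intro cond_names _
  exact pvMain cond_names
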